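-- pv_equiv track=rewrite | github.com/EdwinMeriaux/Rust_4_Robotics | bresenham.py | bresenham_with_obstacles
-- ===== SOURCE A (Python) =====
-- def bresenham_with_obstacles(x0, y0, x1, y1, grid):
--     """
--     Bresenham's line algorithm with obstacle detection.
--
--     :param x0, y0: Starting point
--     :param x1, y1: Ending point
--     :param grid: 2D list where 0 = free, 1 = blocked
--     :return: List of visible points along the line
--     """
--     points = []
--     dx = abs(x1 - x0)
--     dy = abs(y1 - y0)
--     sx = 1 if x0 < x1 else -1
--     sy = 1 if y0 < y1 else -1
--     err = dx - dy
--
--     while True: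
--         if grid[y0][x0] == 1:  # Check for obstacle
--             break
--         points.append((x0, y0))
--
--         if x0 == x1 and y0 == y1:  # If end point is reached
--             break
--
--         e2 = 2 * err
--         if e2 > -dy:
--             err -= dy
--             x0 += sx
--         if e2 < dx:
--             err += dx
--             y0 += sy
--
--     return points
-- ===== SOURCE B (Python) =====
-- def bresenham_with_obstacles(x0, y0, x1, y1, grid):
--     """Closed-form Bresenham: the i-th cell of the line is computed directly
--     from i by an integer-division formula (no err accumulator); cells are
--     probed in order and collected until the first obstacle."""
--     dx = abs(x1 - x0)
--     dy = abs(y1 - y0)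
--     sx = 1 if x0 < x1 else -1
--     sy = 1 if y0 < y1 else -1
--     points = []
--     for i in range(max(dx, dy) + 1):
--         if dx >= dy:
--             x = x0 + i * sx
--             y = y0 + sy * ((2 * i * dy + dx - 1) // (2 * dx)) if dx else y0
--         else:
--             y = y0 + i * sy
--             x = x0 + sx * ((2 * i * dx + dy - 1) // (2 * dy))
--         if grid[y][x] == 1:
--             break
--         points.append((x, y))
--     return points
-- ===== Notes on version B (the rewrite author's own statement) =====
-- stated objective: alternative
-- what changed: A advances (x,y) step by step with an incremental err accumulator in a single while-loop; B computes the i-th line cell directly from i by a closed-form integer-division formula and scans i over range(max(dx,dy)+1), probing the grid in the same order until the first obstacle.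
import Mathlib
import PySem

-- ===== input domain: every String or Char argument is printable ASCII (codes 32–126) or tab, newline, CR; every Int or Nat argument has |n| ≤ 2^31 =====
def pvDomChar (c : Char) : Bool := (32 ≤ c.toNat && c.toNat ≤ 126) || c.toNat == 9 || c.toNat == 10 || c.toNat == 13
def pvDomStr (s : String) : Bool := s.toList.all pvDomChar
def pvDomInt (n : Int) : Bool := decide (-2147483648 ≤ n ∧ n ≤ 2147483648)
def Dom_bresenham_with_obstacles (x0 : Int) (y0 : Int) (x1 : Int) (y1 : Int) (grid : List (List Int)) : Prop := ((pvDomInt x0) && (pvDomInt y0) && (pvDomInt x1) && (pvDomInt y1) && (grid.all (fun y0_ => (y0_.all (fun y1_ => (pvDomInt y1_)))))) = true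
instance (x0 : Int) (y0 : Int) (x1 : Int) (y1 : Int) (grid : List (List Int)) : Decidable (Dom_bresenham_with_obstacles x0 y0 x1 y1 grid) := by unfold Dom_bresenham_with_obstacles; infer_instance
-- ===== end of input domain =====

-- B replaces A's incremental error-accumulator loop by a closed-form integer-division
-- formula for the i-th line cell, scanned over range(max(dx,dy)+1) with the same
-- obstacle probing order (objective: alternative algorithm, same cost).

-- ===== PORT A =====
-- A's while-True loop: check cell, append, check end, advance x and/or y with the err
-- accumulator.  `points` is the Python list built by append (kept reversed, restored on
-- return).  The fuel (dx + dy + 1) is a totality guard only: the Python loop always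
-- terminates within that many iterations.  A `none` cell access is Python's IndexError,
-- excluded by Pre_.
def pvALoop (fuel : Nat) (x0 y0 x1 y1 dx dy sx sy err : Int)
    (grid : List (List Int)) (points : List (Int × Int)) : List (Int × Int) :=
  match fuel with
  | 0 => points.reverse
  | fuel + 1 =>
    match (PySem.List.pyGet? grid y0).bind (fun row => PySem.List.pyGet? row x0) with
    | none => points.reverse
    | some c =>
      if c = 1 then points.reverse
      else
        let points := (x0, y0) :: points
        if x0 = x1 ∧ y0 = y1 then points.reverse
        else
          let e2 := 2 * err
          let err' := if e2 > -dy then err - dy else err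
          let x0' := if e2 > -dy then x0 + sx else x0
          let err'' := if e2 < dx then err' + dx else err'
          let y0' := if e2 < dx then y0 + sy else y0
          pvALoop fuel x0' y0' x1 y1 dx dy sx sy err'' grid points

def bresenham_with_obstacles (x0 : Int) (y0 : Int) (x1 : Int) (y1 : Int) (grid : List (List Int)) : List (Int × Int) :=
  let dx := |x1 - x0|
  let dy := |y1 - y0|
  let sx : Int := if x0 < x1 then 1 else -1
  let sy : Int := if y0 < y1 then 1 else -1
  pvALoop ((dx + dy).toNat + 1) x0 y0 x1 y1 dx dy sx sy (dx - dy) grid []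

-- ===== PORT B =====
-- Source B's loop body: the i-th cell of the line, computed directly from i.
def pvCellB (x0 y0 dx dy sx sy i : Int) : Int × Int :=
  if dy ≤ dx then
    (x0 + i * sx,
     if dx = 0 then y0
     else y0 + sy * PySem.Int.floordiv (2 * i * dy + dx - 1) (2 * dx))
  else
    (x0 + sx * PySem.Int.floordiv (2 * i * dx + dy - 1) (2 * dy), y0 + i * sy)

-- Source B's `for i in range(...)` with break: walk the index list, probe the cell, stop
-- at the first blocked (or, outside Pre_, missing) cell.
def pvBWalk (x0 y0 dx dy sx sy : Int) (grid : List (List Int)) :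
    List Int → List (Int × Int) → List (Int × Int)
  | [], acc => acc.reverse
  | i :: rest, acc =>
    match (PySem.List.pyGet? grid (pvCellB x0 y0 dx dy sx sy i).2).bind
        (fun row => PySem.List.pyGet? row (pvCellB x0 y0 dx dy sx sy i).1) with
    | none => acc.reverse
    | some v =>
      if v = 1 then acc.reverse
      else pvBWalk x0 y0 dx dy sx sy grid rest (pvCellB x0 y0 dx dy sx sy i :: acc)

def bresenham_with_obstacles_alt (x0 : Int) (y0 : Int) (x1 : Int) (y1 : Int) (grid : List (List Int)) : List (Int × Int) :=
  let dx := |x1 - x0|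
  let dy := |y1 - y0|
  let sx : Int := if x0 < x1 then 1 else -1
  let sy : Int := if y0 < y1 then 1 else -1
  pvBWalk x0 y0 dx dy sx sy grid (PySem.List.pyRange 0 (max dx dy + 1) 1) []

-- ===== PRECONDITION & SPEC =====
-- The i-th cell of the Bresenham segment, as a plain arithmetic formula on the four
-- endpoints (used only to state Pre_; it references neither port).
def pvLineCell (x0 y0 x1 y1 i : Int) : Int × Int :=
  if |y1 - y0| ≤ |x1 - x0| then
    (x0 + i * (if x0 < x1 then 1 else -1),
     if x1 - x0 = 0 then y0
     else y0 + (if y0 < y1 then 1 else -1) *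
       PySem.Int.floordiv (2 * i * |y1 - y0| + |x1 - x0| - 1) (2 * |x1 - x0|))
  else
    (x0 + (if x0 < x1 then 1 else -1) *
       PySem.Int.floordiv (2 * i * |x1 - x0| + |y1 - y0| - 1) (2 * |y1 - y0|),
     y0 + i * (if y0 < y1 then 1 else -1))

-- Pre_ excludes exactly the inputs on which Python A raises IndexError: every cell of
-- the segment must be indexable unless a strictly earlier cell of the segment is
-- blocked (A stops there and never reaches the out-of-range cell).  The quantifier is
-- capped at 2*W + 2*H + 5 cells (W = widest row, H = number of rows): the monotone
-- segment provably leaves every indexable cell within that many steps, so the cap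
-- changes nothing and keeps Pre_ evaluable for far-apart endpoints.
def Pre_bresenham_with_obstacles (x0 : Int) (y0 : Int) (x1 : Int) (y1 : Int) (grid : List (List Int)) : Prop :=
  ∀ i ∈ PySem.List.pyRange 0
      (min (max (|x1 - x0|) (|y1 - y0|) + 1)
           (2 * ((grid.map List.length).foldr max 0 : Nat) + 2 * (grid.length : Int) + 5)) 1,
    (∃ j ∈ PySem.List.pyRange 0 i 1,
      (PySem.List.pyGet? grid (pvLineCell x0 y0 x1 y1 j).2).bind
        (fun row => PySem.List.pyGet? row (pvLineCell x0 y0 x1 y1 j).1) = some 1) ∨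
    ((PySem.List.pyGet? grid (pvLineCell x0 y0 x1 y1 i).2).bind
        (fun row => PySem.List.pyGet? row (pvLineCell x0 y0 x1 y1 i).1)).isSome = true
instance (x0 : Int) (y0 : Int) (x1 : Int) (y1 : Int) (grid : List (List Int)) : Decidable (Pre_bresenham_with_obstacles x0 y0 x1 y1 grid) := by unfold Pre_bresenham_with_obstacles; infer_instance

def pvWitness_bresenham_with_obstacles : Int × Int × Int × Int × List (List Int) :=
  (0, 0, 2, 1, [[0, 0, 0], [0, 0, 0]])

def Spec_bresenham_with_obstacles (x0 : Int) (y0 : Int) (x1 : Int) (y1 : Int) (grid : List (List Int)) (out : List (Int × Int)) : Prop := out = bresenham_with_obstacles_alt x0 y0 x1 y1 grid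
instance (x0 : Int) (y0 : Int) (x1 : Int) (y1 : Int) (grid : List (List Int)) (out : List (Int × Int)) : Decidable (Spec_bresenham_with_obstacles x0 y0 x1 y1 grid out) := by unfold Spec_bresenham_with_obstacles; infer_instance

-- ===== CLAIM (what is proved, stated in full; the proofs are below) =====
def Claim_equal_bresenham_with_obstacles : Prop := ∀ (x0 : Int) (y0 : Int) (x1 : Int) (y1 : Int) (grid : List (List Int)), Dom_bresenham_with_obstacles x0 y0 x1 y1 grid → Pre_bresenham_with_obstacles x0 y0 x1 y1 grid → Spec_bresenham_with_obstacles x0 y0 x1 y1 grid (bresenham_with_obstacles x0 y0 x1 y1 grid)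

-- ===== LEMMAS AND PROOFS =====

-- Closed form for A's err accumulator after i steps.
def pvErr (dx dy i : Int) : Int :=
  if dy ≤ dx then
    (if dx = 0 then dx - dy
     else dx - dy - i * dy + (PySem.Int.floordiv (2 * i * dy + dx - 1) (2 * dx)) * dx)
  else dx - dy + i * dx - (PySem.Int.floordiv (2 * i * dx + dy - 1) (2 * dy)) * dy

theorem pvFdivBounds (N d q : Int) (hd : 0 < d)
    (hq : q = PySem.Int.floordiv N (2 * d)) :
    q * (2 * d) ≤ N ∧ N < (q + 1) * (2 * d) :=
  (PySem.Int.floordiv_eq_iff_of_pos (by linarith)).mp hq.symm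

-- dy ≤ dx, dx > 0: x advances every step (e2 > -dy).
theorem pvXadv (dx dy i q : Int) (hdx : 0 < dx) (hdy : 0 ≤ dy) (hle : dy ≤ dx)
    (b1 : q * (2 * dx) ≤ 2 * i * dy + dx - 1)
    (b2 : 2 * i * dy + dx - 1 < (q + 1) * (2 * dx)) :
    -dy < 2 * (dx - dy - i * dy + q * dx) := by
  rcases lt_or_eq_of_le hle with h | h
  · nlinarith
  · subst h
    have h1 : dy * (2 * i - 2 * q) ≤ dy * 1 := by nlinarith
    have h2 : 2 * i - 2 * q ≤ 1 := le_of_mul_le_mul_left h1 hdx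
    have h3 : i ≤ q := by linarith
    have h4 : i * dy ≤ q * dy := mul_le_mul_of_nonneg_right h3 (le_of_lt hdx)
    nlinarith

-- dy ≤ dx, dx > 0: y advances exactly when e2 < dx, matching the floor increment.
theorem pvQstep (dx dy i q q' : Int) (hdx : 0 < dx) (hdy : 0 ≤ dy) (hle : dy ≤ dx)
    (b1 : q * (2 * dx) ≤ 2 * i * dy + dx - 1)
    (b2 : 2 * i * dy + dx - 1 < (q + 1) * (2 * dx))
    (b1' : q' * (2 * dx) ≤ 2 * (i + 1) * dy + dx - 1)
    (b2' : 2 * (i + 1) * dy + dx - 1 < (q' + 1) * (2 * dx)) :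
    (2 * (dx - dy - i * dy + q * dx) < dx → q' = q + 1) ∧
    (¬ 2 * (dx - dy - i * dy + q * dx) < dx → q' = q) := by
  have hqq' : q ≤ q' := by
    have h1 : q * (2 * dx) < (q' + 1) * (2 * dx) := by nlinarith
    have h2 := lt_of_mul_lt_mul_right h1 (by linarith : (0 : Int) ≤ 2 * dx)
    linarith
  have hq'q : q' ≤ q + 1 := by
    have h1 : q' * (2 * dx) < (q + 2) * (2 * dx) := by nlinarith
    have h2 := lt_of_mul_lt_mul_right h1 (by linarith : (0 : Int) ≤ 2 * dx)
    linarith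
  constructor
  · intro h
    by_contra hne
    have he : q' = q := by omega
    subst he
    have h1 : 2 * (dx - dy - i * dy + q' * dx) + 1 ≤ dx := Int.add_one_le_iff.mpr h
    have h2 : 2 * (i + 1) * dy + dx - 1 + 1 ≤ (q' + 1) * (2 * dx) := Int.add_one_le_iff.mpr b2'
    nlinarith
  · intro h
    by_contra hne
    have he : q' = q + 1 := by omega
    subst he
    rw [not_lt] at h
    nlinarith

-- dx < dy: y advances every step (e2 < dx).
theorem pvYadv (dx dy i p : Int) (hdy : 0 < dy) (hdx : 0 ≤ dx) (hlt : dx < dy)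
    (b1 : p * (2 * dy) ≤ 2 * i * dx + dy - 1)
    (b2 : 2 * i * dx + dy - 1 < (p + 1) * (2 * dy)) :
    2 * (dx - dy + i * dx - p * dy) < dx := by
  nlinarith

-- dx < dy: x advances exactly when e2 > -dy, matching the floor increment.
theorem pvPstep (dx dy i p p' : Int) (hdy : 0 < dy) (hdx : 0 ≤ dx) (hlt : dx < dy)
    (b1 : p * (2 * dy) ≤ 2 * i * dx + dy - 1)
    (b2 : 2 * i * dx + dy - 1 < (p + 1) * (2 * dy))
    (b1' : p' * (2 * dy) ≤ 2 * (i + 1) * dx + dy - 1)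
    (b2' : 2 * (i + 1) * dx + dy - 1 < (p' + 1) * (2 * dy)) :
    (-dy < 2 * (dx - dy + i * dx - p * dy) → p' = p + 1) ∧
    (¬ -dy < 2 * (dx - dy + i * dx - p * dy) → p' = p) := by
  have hpp' : p ≤ p' := by
    have h1 : p * (2 * dy) < (p' + 1) * (2 * dy) := by nlinarith
    have h2 := lt_of_mul_lt_mul_right h1 (by linarith : (0 : Int) ≤ 2 * dy)
    linarith
  have hp'p : p' ≤ p + 1 := by
    have h1 : p' * (2 * dy) < (p + 2) * (2 * dy) := by nlinarith
    have h2 := lt_of_mul_lt_mul_right h1 (by linarith : (0 : Int) ≤ 2 * dy)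
    linarith
  constructor
  · intro h
    by_contra hne
    have he : p' = p := by omega
    subst he
    have h1 : -dy + 1 ≤ 2 * (dx - dy + i * dx - p' * dy) := Int.add_one_le_iff.mpr h
    have h2 : 2 * (i + 1) * dx + dy - 1 + 1 ≤ (p' + 1) * (2 * dy) := Int.add_one_le_iff.mpr b2'
    nlinarith
  · intro h
    by_contra hne
    have he : p' = p + 1 := by omega
    subst he
    rw [not_lt] at h
    nlinarith

-- endpoint: b = a + d * s for d = |b - a| and Python's sign choice.
theorem pvEndpt (a b s d : Int) (hd : d = |b - a|) (hs : s = if a < b then 1 else -1) :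
    b = a + d * s := by
  rcases lt_or_ge a b with h | h
  · rw [hd, hs, if_pos h, abs_of_nonneg (by linarith)]; ring
  · rw [hd, hs, if_neg (not_lt.mpr h), abs_of_nonpos (by linarith)]; ring


theorem pvCell0 (x0 y0 dx dy sx sy : Int) (hdx0 : 0 ≤ dx) (hdy0 : 0 ≤ dy) :
    pvCellB x0 y0 dx dy sx sy 0 = (x0, y0) := by
  unfold pvCellB
  rcases le_or_gt dy dx with hle | hlt
  · rw [if_pos hle]
    by_cases h0 : dx = 0
    · simp [h0]
    · have hdxp : 0 < dx := by omega
      have hq : PySem.Int.floordiv (dx - 1) (2 * dx) = 0 := by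
        rw [PySem.Int.floordiv_eq_iff_of_pos (by omega)]
        constructor <;> nlinarith
      simp [h0, hq]
  · rw [if_neg (not_le.mpr hlt)]
    have hdyp : 0 < dy := by omega
    have hq : PySem.Int.floordiv (dy - 1) (2 * dy) = 0 := by
      rw [PySem.Int.floordiv_eq_iff_of_pos (by omega)]
      constructor <;> nlinarith
    simp [hq]

theorem pvErr0 (dx dy : Int) (hdx0 : 0 ≤ dx) (hdy0 : 0 ≤ dy) :
    pvErr dx dy 0 = dx - dy := by
  unfold pvErr
  rcases le_or_gt dy dx with hle | hlt
  · rw [if_pos hle]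
    by_cases h0 : dx = 0
    · simp [h0]
    · have hdxp : 0 < dx := by omega
      have hq : PySem.Int.floordiv (2 * 0 * dy + dx - 1) (2 * dx) = 0 := by
        rw [PySem.Int.floordiv_eq_iff_of_pos (by omega)]
        constructor <;> nlinarith
      rw [if_neg h0, hq]; ring
  · rw [if_neg (not_le.mpr hlt)]
    have hdyp : 0 < dy := by omega
    have hq : PySem.Int.floordiv (2 * 0 * dx + dy - 1) (2 * dy) = 0 := by
      rw [PySem.Int.floordiv_eq_iff_of_pos (by omega)]
      constructor <;> nlinarith
    rw [hq]; ring

-- One step of A's loop, expressed on the closed forms.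
theorem pvStepState (dx dy i x0 y0 sx sy : Int)
    (hdx0 : 0 ≤ dx) (hdy0 : 0 ≤ dy) (hi : 0 ≤ i) (hilt : i < max dx dy) :
    (if 2 * pvErr dx dy i > -dy then (pvCellB x0 y0 dx dy sx sy i).1 + sx
     else (pvCellB x0 y0 dx dy sx sy i).1) = (pvCellB x0 y0 dx dy sx sy (i + 1)).1 ∧
    (if 2 * pvErr dx dy i < dx then (pvCellB x0 y0 dx dy sx sy i).2 + sy
     else (pvCellB x0 y0 dx dy sx sy i).2) = (pvCellB x0 y0 dx dy sx sy (i + 1)).2 ∧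
    (if 2 * pvErr dx dy i < dx
     then (if 2 * pvErr dx dy i > -dy then pvErr dx dy i - dy else pvErr dx dy i) + dx
     else (if 2 * pvErr dx dy i > -dy then pvErr dx dy i - dy else pvErr dx dy i))
      = pvErr dx dy (i + 1) := by
  rcases le_or_gt dy dx with hle | hlt
  · have hM : max dx dy = dx := max_eq_left hle
    have hdxp : 0 < dx := by omega
    have h0 : ¬ dx = 0 := by omega
    have b := pvFdivBounds (2 * i * dy + dx - 1) dx
      (PySem.Int.floordiv (2 * i * dy + dx - 1) (2 * dx)) hdxp rfl
    have b' := pvFdivBounds (2 * (i + 1) * dy + dx - 1) dx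
      (PySem.Int.floordiv (2 * (i + 1) * dy + dx - 1) (2 * dx)) hdxp rfl
    set q := PySem.Int.floordiv (2 * i * dy + dx - 1) (2 * dx) with hqd
    set q' := PySem.Int.floordiv (2 * (i + 1) * dy + dx - 1) (2 * dx) with hq'd
    have hE : pvErr dx dy i = dx - dy - i * dy + q * dx := by
      simp [pvErr, hle, h0, ← hqd]
    have hE' : pvErr dx dy (i + 1) = dx - dy - (i + 1) * dy + q' * dx := by
      simp [pvErr, hle, h0, ← hq'd]
    have hC : pvCellB x0 y0 dx dy sx sy i = (x0 + i * sx, y0 + sy * q) := by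
      simp [pvCellB, hle, h0, ← hqd]
    have hC' : pvCellB x0 y0 dx dy sx sy (i + 1) = (x0 + (i + 1) * sx, y0 + sy * q') := by
      simp [pvCellB, hle, h0, ← hq'd]
    have hxadv : -dy < 2 * pvErr dx dy i := by
      rw [hE]; exact pvXadv dx dy i q hdxp hdy0 hle b.1 b.2
    have hstep := pvQstep dx dy i q q' hdxp hdy0 hle b.1 b.2 b'.1 b'.2
    refine ⟨?_, ?_, ?_⟩
    · rw [if_pos hxadv, hC, hC']; ring_nf
    · by_cases hY : 2 * pvErr dx dy i < dx
      · have hq1 : q' = q + 1 := hstep.1 (by rw [← hE]; exact hY)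
        rw [if_pos hY, hC, hC', hq1]; ring_nf
      · have hq1 : q' = q := hstep.2 (by rw [← hE]; exact hY)
        rw [if_neg hY, hC, hC', hq1]
    · by_cases hY : 2 * pvErr dx dy i < dx
      · have hq1 : q' = q + 1 := hstep.1 (by rw [← hE]; exact hY)
        rw [if_pos hY, if_pos hxadv, hE, hE', hq1]; ring
      · have hq1 : q' = q := hstep.2 (by rw [← hE]; exact hY)
        rw [if_neg hY, if_pos hxadv, hE, hE', hq1]; ring
  · have hdyp : 0 < dy := by omega
    have hnle : ¬ dy ≤ dx := not_le.mpr hlt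
    have b := pvFdivBounds (2 * i * dx + dy - 1) dy
      (PySem.Int.floordiv (2 * i * dx + dy - 1) (2 * dy)) hdyp rfl
    have b' := pvFdivBounds (2 * (i + 1) * dx + dy - 1) dy
      (PySem.Int.floordiv (2 * (i + 1) * dx + dy - 1) (2 * dy)) hdyp rfl
    set p := PySem.Int.floordiv (2 * i * dx + dy - 1) (2 * dy) with hpd
    set p' := PySem.Int.floordiv (2 * (i + 1) * dx + dy - 1) (2 * dy) with hp'd
    have hE : pvErr dx dy i = dx - dy + i * dx - p * dy := by
      simp [pvErr, hnle, ← hpd]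
    have hE' : pvErr dx dy (i + 1) = dx - dy + (i + 1) * dx - p' * dy := by
      simp [pvErr, hnle, ← hp'd]
    have hC : pvCellB x0 y0 dx dy sx sy i = (x0 + sx * p, y0 + i * sy) := by
      simp [pvCellB, hnle, ← hpd]
    have hC' : pvCellB x0 y0 dx dy sx sy (i + 1) = (x0 + sx * p', y0 + (i + 1) * sy) := by
      simp [pvCellB, hnle, ← hp'd]
    have hyadv : 2 * pvErr dx dy i < dx := by
      rw [hE]; exact pvYadv dx dy i p hdyp hdx0 hlt b.1 b.2
    have hstep := pvPstep dx dy i p p' hdyp hdx0 hlt b.1 b.2 b'.1 b'.2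
    refine ⟨?_, ?_, ?_⟩
    · by_cases hX : -dy < 2 * pvErr dx dy i
      · have hp1 : p' = p + 1 := hstep.1 (by rw [← hE]; exact hX)
        rw [if_pos hX, hC, hC', hp1]; ring_nf
      · have hp1 : p' = p := hstep.2 (by rw [← hE]; exact hX)
        rw [if_neg hX, hC, hC', hp1]
    · rw [if_pos hyadv, hC, hC']; ring_nf
    · by_cases hX : -dy < 2 * pvErr dx dy i
      · have hp1 : p' = p + 1 := hstep.1 (by rw [← hE]; exact hX)
        rw [if_pos hyadv, if_pos hX, hE, hE', hp1]; ring
      · have hp1 : p' = p := hstep.2 (by rw [← hE]; exact hX)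
        rw [if_pos hyadv, if_neg hX, hE, hE', hp1]; ring

-- A's end test is hit exactly at the last index.
theorem pvEndIff (x0 y0 x1 y1 dx dy sx sy i : Int)
    (hdx : dx = |x1 - x0|) (hdy : dy = |y1 - y0|)
    (hsx : sx = if x0 < x1 then 1 else -1) (hsy : sy = if y0 < y1 then 1 else -1)
    (hi : 0 ≤ i) (hile : i ≤ max dx dy) :
    ((pvCellB x0 y0 dx dy sx sy i).1 = x1 ∧ (pvCellB x0 y0 dx dy sx sy i).2 = y1)
      ↔ i = max dx dy := by
  have hdx0 : 0 ≤ dx := hdx ▸ abs_nonneg _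
  have hdy0 : 0 ≤ dy := hdy ▸ abs_nonneg _
  have hx1 : x1 = x0 + dx * sx := pvEndpt x0 x1 sx dx hdx hsx
  have hy1 : y1 = y0 + dy * sy := pvEndpt y0 y1 sy dy hdy hsy
  have hsx1 : sx = 1 ∨ sx = -1 := by rw [hsx]; split_ifs <;> simp
  have hsy1 : sy = 1 ∨ sy = -1 := by rw [hsy]; split_ifs <;> simp
  rcases le_or_gt dy dx with hle | hlt
  · have hM : max dx dy = dx := max_eq_left hle
    by_cases h0 : dx = 0
    · have hdye : dy = 0 := by omega
      have hie : i = 0 := by omega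
      subst hie
      rw [pvCell0 x0 y0 dx dy sx sy hdx0 hdy0]
      constructor
      · intro _; omega
      · intro _
        constructor
        · rw [hx1, h0]; ring
        · rw [hy1, hdye]; ring
    · have hdxp : 0 < dx := by omega
      have hC : (pvCellB x0 y0 dx dy sx sy i).1 = x0 + i * sx := by
        simp [pvCellB, hle, h0]
      constructor
      · rintro ⟨h1, -⟩
        rw [hC, hx1] at h1
        rcases hsx1 with hs | hs <;> rw [hs] at h1 <;> omega
      · intro hie
        have hqn : PySem.Int.floordiv (2 * i * dy + dx - 1) (2 * dx) = dy := by
          rw [PySem.Int.floordiv_eq_iff_of_pos (by omega), hie, hM]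
          constructor <;> nlinarith
        constructor
        · rw [hC, hx1, hie, hM]
        · simp only [pvCellB, if_pos hle, if_neg h0, hqn]
          rw [hy1]; ring
  · have hM : max dx dy = dy := max_eq_right (le_of_lt hlt)
    have hdyp : 0 < dy := by omega
    have hnle : ¬ dy ≤ dx := not_le.mpr hlt
    have hC : (pvCellB x0 y0 dx dy sx sy i).2 = y0 + i * sy := by
      simp [pvCellB, hnle]
    constructor
    · rintro ⟨-, h2⟩
      rw [hC, hy1] at h2
      rcases hsy1 with hs | hs <;> rw [hs] at h2 <;> omega
    · intro hie
      have hpn : PySem.Int.floordiv (2 * i * dx + dy - 1) (2 * dy) = dx := by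
        rw [PySem.Int.floordiv_eq_iff_of_pos (by omega), hie, hM]
        constructor <;> nlinarith
      constructor
      · simp only [pvCellB, if_neg hnle, hpn]
        rw [hx1]; ring
      · rw [hC, hy1, hie, hM]

theorem pvMain (x0 y0 x1 y1 dx dy sx sy : Int) (grid : List (List Int))
    (hdx : dx = |x1 - x0|) (hdy : dy = |y1 - y0|)
    (hsx : sx = if x0 < x1 then 1 else -1) (hsy : sy = if y0 < y1 then 1 else -1) :
    ∀ (fuel : Nat) (i : Int) (acc : List (Int × Int)),
      0 ≤ i → i ≤ max dx dy → max dx dy - i < (fuel : Int) →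
      pvALoop fuel (pvCellB x0 y0 dx dy sx sy i).1 (pvCellB x0 y0 dx dy sx sy i).2
        x1 y1 dx dy sx sy (pvErr dx dy i) grid acc
      = pvBWalk x0 y0 dx dy sx sy grid (PySem.List.pyRange i (max dx dy + 1) 1) acc := by
  intro fuel
  induction fuel with
  | zero => intro i acc h0 hile hf; exfalso; push_cast at hf; omega
  | succ fuel ih =>
    intro i acc h0 hile hf
    rw [PySem.List.pyRange_one_cons (by omega)]
    simp only [pvALoop, pvBWalk]
    cases hlk : (PySem.List.pyGet? grid (pvCellB x0 y0 dx dy sx sy i).2).bind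
        (fun row => PySem.List.pyGet? row (pvCellB x0 y0 dx dy sx sy i).1) with
    | none => rfl
    | some v =>
      by_cases hv : v = 1
      · simp [hv]
      · simp only [hv, if_false]
        have hend := pvEndIff x0 y0 x1 y1 dx dy sx sy i hdx hdy hsx hsy h0 hile
        by_cases hi : i = max dx dy
        · rw [if_pos (hend.mpr hi)]
          rw [show PySem.List.pyRange (i + 1) (max dx dy + 1) 1 = [] from
            PySem.List.pyRange_one_eq_nil (by omega)]
          simp [pvBWalk]
        · rw [if_neg (fun hc => hi (hend.mp hc))]
          have hstep := pvStepState dx dy i x0 y0 sx sy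
            (hdx ▸ abs_nonneg _) (hdy ▸ abs_nonneg _) h0 (by omega)
          rw [hstep.1, hstep.2.1, hstep.2.2]
          exact ih (i + 1) (((pvCellB x0 y0 dx dy sx sy i).1,
            (pvCellB x0 y0 dx dy sx sy i).2) :: acc) (by omega) (by omega) (by omega)

-- ===== VERDICT (by name: the statement is the Claim_ definition above) =====
theorem bresenham_with_obstacles_spec : Claim_equal_bresenham_with_obstacles := by
  intro x0 y0 x1 y1 grid _ _
  unfold Spec_bresenham_with_obstacles bresenham_with_obstacles bresenham_with_obstacles_alt
  have hdx0 : (0 : Int) ≤ |x1 - x0| := abs_nonneg _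
  have hdy0 : (0 : Int) ≤ |y1 - y0| := abs_nonneg _
  have h := pvMain x0 y0 x1 y1 (|x1 - x0|) (|y1 - y0|)
      (if x0 < x1 then 1 else -1) (if y0 < y1 then 1 else -1) grid rfl rfl rfl rfl
      ((|x1 - x0| + |y1 - y0|).toNat + 1) 0 [] le_rfl
      (le_max_of_le_left hdx0)
      (by push_cast [Int.toNat_of_nonneg (add_nonneg hdx0 hdy0)]
          rcases max_cases (|x1 - x0|) (|y1 - y0|) with ⟨h1, _⟩ | ⟨h1, _⟩ <;> linarith)
  rw [pvCell0 _ _ _ _ _ _ hdx0 hdy0, pvErr0 _ _ hdx0 hdy0] at h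
  simpa using h
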